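-- pv_equiv track=rewrite | github.com/G4tLan/fxbot | consolidation_breakout.py | merge_runs
-- ===== SOURCE A (Python) =====
-- def merge_runs(runs_list):
--     """Merge adjacent runs with same boolean. Input: list[(bool,int)]. Output: list[(bool,int)]."""
--     if not runs_list:
--         return []
--     merged = []
--     current_bool, current_len = runs_list[0]
--     for b, ln in runs_list[1:]:
--         if b == current_bool:
--             current_len += ln
--         else:
--             merged.append((current_bool, current_len))
--             current_bool, current_len = b, ln
--     merged.append((current_bool, current_len))
--     return merged
-- ===== SOURCE B (Python) =====
-- def merge_runs(runs_list):
--     """Merge adjacent runs with same boolean. Input: list[(bool,int)]. Output: list[(bool,int)]."""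
--     n = len(runs_list)
--     if n == 0:
--         return []
--     if n == 1:
--         return [runs_list[0]]
--     left = merge_runs(runs_list[:n // 2])
--     right = merge_runs(runs_list[n // 2:])
--     if left[-1][0] == right[0][0]:
--         return left[:-1] + [(left[-1][0], left[-1][1] + right[0][1])] + right[1:]
--     return left + right
-- ===== Notes on version B (the rewrite author's own statement) =====
-- stated objective: alternative
-- what changed: Replaced A's single left-to-right pass with a flush-on-change accumulator by a divide-and-conquer recursion: split the list in half, merge each half recursively, then join the two results, fusing the seam runs if their booleans match.
import Mathlib
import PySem

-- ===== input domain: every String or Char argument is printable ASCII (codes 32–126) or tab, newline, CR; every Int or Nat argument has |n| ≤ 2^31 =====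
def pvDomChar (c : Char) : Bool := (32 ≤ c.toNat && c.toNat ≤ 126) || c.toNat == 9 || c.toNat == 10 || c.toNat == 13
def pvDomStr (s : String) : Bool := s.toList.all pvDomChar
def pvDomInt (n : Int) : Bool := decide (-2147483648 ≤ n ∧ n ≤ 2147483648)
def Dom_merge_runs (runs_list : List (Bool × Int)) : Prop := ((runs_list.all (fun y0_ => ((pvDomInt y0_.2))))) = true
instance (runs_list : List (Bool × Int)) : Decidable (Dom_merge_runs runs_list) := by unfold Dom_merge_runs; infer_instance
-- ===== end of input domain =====

-- B replaces A's single-pass accumulator loop by a divide-and-conquer recursion (alternative decomposition, not faster).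
-- ===== PORT A =====
-- the for-loop over runs_list[1:] with state (merged, current_bool, current_len); merged is emitted in order
def mergeLoopA : List (Bool × Int) → Bool → Int → List (Bool × Int)
  | [], cb, cl => [(cb, cl)]
  | (b, ln) :: rest, cb, cl =>
    if b == cb then mergeLoopA rest cb (cl + ln)
    else (cb, cl) :: mergeLoopA rest b ln

def merge_runs (runs_list : List (Bool × Int)) : List (Bool × Int) :=
  match runs_list with
  | [] => []
  | (cb, cl) :: rest => mergeLoopA rest cb cl

-- ===== PORT B =====
-- the seam join of Source B: left[:-1] + [(left[-1][0], left[-1][1]+right[0][1])] + right[1:] when booleans match, else left + right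
def joinRuns (l r : List (Bool × Int)) : List (Bool × Int) :=
  match l.getLast?, r with
  | some (lb, ll), (rb, rl) :: rt =>
    if lb == rb then l.dropLast ++ (lb, ll + rl) :: rt else l ++ r
  | _, _ => l ++ r

-- the recursion of Source B, driven by a fuel counter (= initial length) that only guarantees
-- termination: the [] / [p] base cases and the half-split recursive case are Source B's own
def mergeRunsGo : Nat → List (Bool × Int) → List (Bool × Int)
  | _, [] => []
  | _, [p] => [p]
  | 0, _ => []   -- fuel exhausted; never reached when fuel ≥ length
  | fuel + 1, x :: y :: rest =>
    let xs := x :: y :: rest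
    let n := xs.length
    joinRuns (mergeRunsGo fuel (xs.take (n / 2))) (mergeRunsGo fuel (xs.drop (n / 2)))

def merge_runs_alt (runs_list : List (Bool × Int)) : List (Bool × Int) :=
  mergeRunsGo runs_list.length runs_list

-- ===== PRECONDITION & SPEC =====
def Spec_merge_runs (runs_list : List (Bool × Int)) (out : List (Bool × Int)) : Prop := out = merge_runs_alt runs_list
instance (runs_list : List (Bool × Int)) (out : List (Bool × Int)) : Decidable (Spec_merge_runs runs_list out) := by unfold Spec_merge_runs; infer_instance

-- ===== CLAIM (what is proved, stated in full; the proofs are below) =====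
def Claim_equal_merge_runs : Prop := ∀ (runs_list : List (Bool × Int)), Dom_merge_runs runs_list → Spec_merge_runs runs_list (merge_runs runs_list)

-- ===== LEMMAS AND PROOFS =====

-- the head of A's loop result carries the current boolean
lemma mergeLoopA_head (xs : List (Bool × Int)) (cb : Bool) (cl : Int) :
    ∃ v t, mergeLoopA xs cb cl = (cb, v) :: t := by
  induction xs generalizing cb cl with
  | nil => exact ⟨cl, [], rfl⟩
  | cons p rest ih =>
    obtain ⟨b, ln⟩ := p
    by_cases h : b == cb
    · rw [mergeLoopA, if_pos h]; exact ih cb (cl + ln)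
    · rw [mergeLoopA, if_neg h]
      obtain ⟨v, t, ht⟩ := ih b ln
      exact ⟨cl, (b, v) :: t, by rw [ht]⟩

lemma mergeLoopA_ne_nil (xs : List (Bool × Int)) (cb : Bool) (cl : Int) :
    mergeLoopA xs cb cl ≠ [] := by
  obtain ⟨v, t, h⟩ := mergeLoopA_head xs cb cl
  simp [h]

-- adding to the starting length adds to the head of the result
lemma mergeLoopA_add (xs : List (Bool × Int)) (cb : Bool) (a cl : Int) :
    ∀ v t, mergeLoopA xs cb cl = (cb, v) :: t → mergeLoopA xs cb (a + cl) = (cb, a + v) :: t := by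
  induction xs generalizing cl with
  | nil => intro v t h; simp [mergeLoopA] at h ⊢; simp [h.1, h.2]
  | cons p rest ih =>
    obtain ⟨b, ln⟩ := p
    intro v t h
    by_cases hb : b == cb
    · rw [mergeLoopA, if_pos hb] at h ⊢
      rw [add_assoc]; exact ih (cl + ln) v t h
    · rw [mergeLoopA, if_neg hb] at h ⊢
      cases h; rfl

lemma joinRuns_cons (p : Bool × Int) (l r : List (Bool × Int)) (hl : l ≠ []) :
    joinRuns (p :: l) r = p :: joinRuns l r := by
  match l, r with
  | q :: t, [] => simp [joinRuns]
  | q :: t, (rb, rl) :: rt =>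
    unfold joinRuns
    rw [List.getLast?_cons_cons]
    match h : (q :: t).getLast? with
    | some (lb, ll) =>
      by_cases hb : lb == rb <;> simp [hb, List.dropLast_cons_of_ne_nil (l := q :: t) (by simp)]
    | none => simp at h

-- A on a concatenation = seam-join of A on the pieces
lemma mergeLoopA_append (xs ys : List (Bool × Int)) (cb : Bool) (cl : Int) :
    mergeLoopA (xs ++ ys) cb cl = joinRuns (mergeLoopA xs cb cl) (merge_runs ys) := by
  induction xs generalizing cb cl with
  | nil =>
    match ys with
    | [] => simp [mergeLoopA, merge_runs, joinRuns]
    | (b, ln) :: rest =>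
      simp only [List.nil_append, merge_runs, mergeLoopA]
      obtain ⟨v, t, ht⟩ := mergeLoopA_head rest b ln
      rw [ht]
      by_cases hb : b == cb
      · rw [if_pos hb]
        have hcb : b = cb := by simpa using hb
        subst hcb
        rw [mergeLoopA_add rest b cl ln v t ht]
        simp [joinRuns]
      · rw [if_neg hb]
        have : (cb == b) = false := by
          simp at hb ⊢; exact fun h => hb h.symm
        simp [joinRuns, this]
  | cons p rest ih =>
    obtain ⟨b, ln⟩ := p
    by_cases hb : b == cb
    · simp only [List.cons_append, mergeLoopA, if_pos hb]
      exact ih cb (cl + ln)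
    · simp only [List.cons_append, mergeLoopA, if_neg hb]
      rw [ih b ln, joinRuns_cons _ _ _ (mergeLoopA_ne_nil rest b ln)]

lemma merge_runs_append_ne_nil (xs ys : List (Bool × Int)) (hx : xs ≠ []) :
    merge_runs (xs ++ ys) = joinRuns (merge_runs xs) (merge_runs ys) := by
  match xs with
  | (cb, cl) :: t =>
    simp only [List.cons_append, merge_runs]
    exact mergeLoopA_append t ys cb cl

-- the fuel recursion computes A's merge whenever the fuel covers the length
lemma mergeRunsGo_eq (fuel : Nat) : ∀ (xs : List (Bool × Int)), xs.length ≤ fuel →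
    mergeRunsGo fuel xs = merge_runs xs := by
  induction fuel with
  | zero =>
    intro xs h
    rw [List.length_eq_zero_iff.mp (Nat.le_zero.mp h)]
    rfl
  | succ n ih =>
    intro xs hlen
    match xs, hlen with
    | [], _ => rfl
    | [p], _ => simp [mergeRunsGo, merge_runs, mergeLoopA]
    | x :: y :: rest, hlen =>
      simp only [List.length_cons] at hlen
      have h1 : ((x :: y :: rest).take ((x :: y :: rest).length / 2)).length ≤ n := by
        simp only [List.length_take, List.length_cons]
        omega
      have h2 : ((x :: y :: rest).drop ((x :: y :: rest).length / 2)).length ≤ n := by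
        simp only [List.length_drop, List.length_cons]
        omega
      have hne : (x :: y :: rest).take ((x :: y :: rest).length / 2) ≠ [] := by
        simp only [ne_eq, List.take_eq_nil_iff, List.length_cons, List.cons_ne_nil, or_false]
        omega
      rw [mergeRunsGo, ih _ h1, ih _ h2, ← merge_runs_append_ne_nil _ _ hne,
        List.take_append_drop]

-- ===== VERDICT (by name: the statement is the Claim_ definition above) =====
theorem merge_runs_spec : Claim_equal_merge_runs := by
  intro runs_list _
  unfold Spec_merge_runs merge_runs_alt
  exact (mergeRunsGo_eq runs_list.length runs_list le_rfl).symm
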